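-- pv_equiv track=rewrite | github.com/peterdresslar/hybrid-signal-lab | docs/analysis/figure_generation/scripts/make_sweep_roundup_rank_versions.py | _group_spans
-- ===== SOURCE A (Python) =====
-- def _group_spans(rows: list[dict]) -> list[tuple[int, int, str]]:
--     spans: list[tuple[int, int, str]] = []
--     start = 0
--     current = rows[0]["group"]
--     for i, row in enumerate(rows):
--         if row["group"] != current:
--             spans.append((start, i - 1, current))
--             start = i
--             current = row["group"]
--     spans.append((start, len(rows) - 1, current))
--     return spans
-- ===== SOURCE B (Python) =====
-- def _group_spans(rows: list[dict]) -> list[tuple[int, int, str]]: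
--     # Two-pass decomposition: find change points (span starts with their group
--     # value), then assemble spans by pairing each start with the next boundary.
--     groups = [row["group"] for row in rows]
--     n = len(groups)
--     starts = [(0, groups[0])] + [
--         (i + 1, b) for i, (a, b) in enumerate(zip(groups, groups[1:])) if a != b
--     ]
--     ends = [s for s, _ in starts[1:]] + [n]
--     return [(s, e - 1, g) for (s, g), e in zip(starts, ends)]
-- ===== Notes on version B (the rewrite author's own statement) =====
-- stated objective: alternative
-- what changed: Replaced the single stateful accumulate-as-you-go loop with a two-pass decomposition: first collect the span-start change points (index, group) by comparing adjacent pairs, then assemble spans by pairing each start with the next boundary.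
import Mathlib
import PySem

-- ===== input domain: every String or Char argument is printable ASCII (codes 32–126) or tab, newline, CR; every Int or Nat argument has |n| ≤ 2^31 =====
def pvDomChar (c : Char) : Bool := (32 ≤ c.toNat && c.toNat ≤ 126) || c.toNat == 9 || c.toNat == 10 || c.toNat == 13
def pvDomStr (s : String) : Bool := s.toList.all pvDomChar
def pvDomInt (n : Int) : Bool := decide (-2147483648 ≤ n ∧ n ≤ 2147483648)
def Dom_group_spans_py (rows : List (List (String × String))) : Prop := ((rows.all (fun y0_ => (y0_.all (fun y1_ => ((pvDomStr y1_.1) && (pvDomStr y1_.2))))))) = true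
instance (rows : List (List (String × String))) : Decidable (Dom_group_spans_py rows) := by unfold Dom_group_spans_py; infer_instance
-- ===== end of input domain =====

-- B builds the spans in two passes (change points, then assembly) instead of A's
-- single stateful loop; same cost, different decomposition. Return value only.

-- row["group"] (first-match assoc-list lookup; Pre_ guarantees the key is present)
def pvGroup (row : List (String × String)) : String :=
  (PySem.Dict.mk row).getD "group" ""

-- ===== PORT A =====
-- the for-loop over enumerate(rows) with state (spans, start, current)
def aLoop (rows : List (List (String × String))) (i : Int)
    (st : List (Int × Int × String) × Int × String) :
    List (Int × Int × String) × Int × String :=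
  match rows with
  | [] => st
  | row :: rest =>
    if pvGroup row != st.2.2 then
      aLoop rest (i + 1) (st.1 ++ [(st.2.1, i - 1, st.2.2)], i, pvGroup row)
    else
      aLoop rest (i + 1) st

def group_spans_py (rows : List (List (String × String))) : List (Int × Int × String) :=
  match rows with
  | [] => []  -- Python raises IndexError on rows[0]; excluded by Pre_
  | r0 :: _ =>
    let st := aLoop rows 0 ([], 0, pvGroup r0)
    st.1 ++ [(st.2.1, (rows.length : Int) - 1, st.2.2)]

-- ===== PORT B =====
def group_spans_py_alt (rows : List (List (String × String))) : List (Int × Int × String) :=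
  let groups := rows.map pvGroup
  let n : Int := groups.length
  let starts : List (Int × String) :=
    (0, PySem.List.pyGetD groups 0 "") ::
      ((PySem.List.enumerate (groups.zip groups.tail) 0).filter
          (fun p => p.2.1 != p.2.2)).map (fun p => (p.1 + 1, p.2.2))
  let ends : List Int := starts.tail.map (·.1) ++ [n]
  (starts.zip ends).map (fun p => (p.1.1, p.2 - 1, p.1.2))

-- ===== PRECONDITION & SPEC =====
-- Pre_ excludes exactly the inputs where the Python A raises: the empty list
-- (IndexError on rows[0]) and rows missing the "group" key (KeyError).
def Pre_group_spans_py (rows : List (List (String × String))) : Prop :=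
  rows ≠ [] ∧ ∀ row ∈ rows, (PySem.Dict.mk row).contains "group" = true
instance (rows : List (List (String × String))) : Decidable (Pre_group_spans_py rows) := by
  unfold Pre_group_spans_py; infer_instance

def pvWitness_group_spans_py : (List (List (String × String))) :=
  [[("group", "a")], [("group", "a")], [("group", "b")]]

def Spec_group_spans_py (rows : List (List (String × String))) (out : List (Int × Int × String)) : Prop := out = group_spans_py_alt rows
instance (rows : List (List (String × String))) (out : List (Int × Int × String)) : Decidable (Spec_group_spans_py rows out) := by unfold Spec_group_spans_py; infer_instance

-- ===== CLAIM (what is proved, stated in full; the proofs are below) =====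
def Claim_equal_group_spans_py : Prop := ∀ (rows : List (List (String × String))), Dom_group_spans_py rows → Pre_group_spans_py rows → Spec_group_spans_py rows (group_spans_py rows)

-- ===== LEMMAS AND PROOFS =====

-- canonical recursive description of the spans of a group list, starting at index i
def runsP (start : Int) (cur : String) (i : Int) : List String → List (Int × Int × String)
  | [] => [(start, i - 1, cur)]
  | x :: t => if x ≠ cur then (start, i - 1, cur) :: runsP i x (i + 1) t
              else runsP start cur (i + 1) t

-- change points (span starts with group value) of prev :: l, l indexed from j
def startsFromP (j : Int) (prev : String) : List String → List (Int × String)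
  | [] => []
  | x :: t => if prev ≠ x then (j, x) :: startsFromP (j + 1) x t
              else startsFromP (j + 1) x t

-- recursive form of B's assembly zip
def assembleP (h : Int × String) (rest : List (Int × String)) (n : Int) :
    List (Int × Int × String) :=
  match rest with
  | [] => [(h.1, n - 1, h.2)]
  | h2 :: r => (h.1, h2.1 - 1, h.2) :: assembleP h2 r n

lemma aLoop_spec (rest : List (List (String × String))) :
    ∀ (i : Int) (spans : List (Int × Int × String)) (start : Int) (cur : String),
      (aLoop rest i (spans, start, cur)).1 ++
          [((aLoop rest i (spans, start, cur)).2.1, i + (rest.length : Int) - 1,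
            (aLoop rest i (spans, start, cur)).2.2)] =
        spans ++ runsP start cur i (rest.map pvGroup) := by
  induction rest with
  | nil => intro i spans start cur; simp [aLoop, runsP]
  | cons r t ih =>
    intro i spans start cur
    by_cases h : pvGroup r = cur
    · simp only [aLoop, h, bne_self_eq_false, Bool.false_eq_true, if_false, List.map_cons,
        runsP, ne_eq, not_true_eq_false, if_false]
      have := ih (i + 1) spans start cur
      simp only [List.length_cons] at *
      push_cast at *
      rw [show i + ((t.length : Int) + 1) - 1 = i + 1 + (t.length : Int) - 1 by ring]
      exact this
    · simp only [aLoop, bne_iff_ne, ne_eq, h, not_false_eq_true, List.map_cons, runsP,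
        if_pos]
      have := ih (i + 1) (spans ++ [(start, i - 1, cur)]) i (pvGroup r)
      simp only [List.length_cons] at *
      push_cast at *
      rw [show i + 1 + (t.length : Int) - 1 = i + ((t.length : Int) + 1) - 1 by ring] at this
      rw [this, List.append_assoc, List.singleton_append]

lemma startsFrom_spec (l : List String) :
    ∀ (prev : String) (j : Int),
      ((PySem.List.enumerate ((prev :: l).zip l) j).filter
          (fun p => p.2.1 != p.2.2)).map (fun p => (p.1 + 1, p.2.2)) =
        startsFromP (j + 1) prev l := by
  induction l with
  | nil => intro prev j; simp [startsFromP, PySem.List.enumerate_nil]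
  | cons x t ih =>
    intro prev j
    by_cases h : prev = x
    · simp [PySem.List.enumerate_cons, h, startsFromP, ih]
    · simp [PySem.List.enumerate_cons, bne_iff_ne, h, startsFromP, ih]

lemma assemble_spec (rest : List (Int × String)) :
    ∀ (h : Int × String) (n : Int),
      (((h :: rest).zip ((rest.map (·.1)) ++ [n])).map
          (fun p => (p.1.1, p.2 - 1, p.1.2))) = assembleP h rest n := by
  induction rest with
  | nil => intro h n; simp [assembleP]
  | cons h2 r ih => intro h n; simp [assembleP, ih h2 n]

lemma assemble_startsFrom (l : List String) :
    ∀ (s : Int) (prev : String) (j : Int),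
      assembleP (s, prev) (startsFromP (j + 1) prev l) (j + 1 + (l.length : Int)) =
        runsP s prev (j + 1) l := by
  induction l with
  | nil => intro s prev j; simp [startsFromP, assembleP, runsP]
  | cons x t ih =>
    intro s prev j
    by_cases h : x = prev
    · simp only [startsFromP, ne_eq, h, not_true_eq_false, if_false, runsP,
        List.length_cons]
      have := ih s prev (j + 1)
      push_cast at *
      rw [show j + 1 + ((t.length : Int) + 1) = j + 1 + 1 + (t.length : Int) by ring]
      exact this
    · simp only [startsFromP, ne_eq, h, Ne.symm h, not_false_eq_true, if_pos, assembleP, runsP,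
        List.length_cons]
      have := ih (j + 1) x (j + 1)
      push_cast at *
      rw [show j + 1 + ((t.length : Int) + 1) = j + 1 + 1 + (t.length : Int) by ring, this]

lemma a_eq_runs (r : List (String × String)) (rest : List (List (String × String))) :
    group_spans_py (r :: rest) = runsP 0 (pvGroup r) 1 (rest.map pvGroup) := by
  show (aLoop (r :: rest) 0 ([], 0, pvGroup r)).1 ++ _ = _
  simp only [aLoop, bne_self_eq_false, Bool.false_eq_true, if_false]
  have := aLoop_spec rest 1 [] 0 (pvGroup r)
  simp only [List.nil_append] at this
  rw [show ((r :: rest).length : Int) - 1 = 1 + (rest.length : Int) - 1 by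
    push_cast [List.length_cons]; ring]
  exact this

lemma b_eq_runs (r : List (String × String)) (rest : List (List (String × String))) :
    group_spans_py_alt (r :: rest) = runsP 0 (pvGroup r) 1 (rest.map pvGroup) := by
  unfold group_spans_py_alt
  simp only [List.map_cons, List.tail_cons, PySem.List.pyGetD_zero_cons, List.length_cons,
    List.length_map]
  rw [startsFrom_spec (rest.map pvGroup) (pvGroup r) 0]
  rw [assemble_spec]
  have := assemble_startsFrom (rest.map pvGroup) 0 (pvGroup r) 0
  simp only [List.length_map] at this
  push_cast at this ⊢
  rw [show ((rest.length : Int) + 1) = 0 + 1 + (rest.length : Int) by ring]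
  exact this

-- ===== VERDICT (by name: the statement is the Claim_ definition above) =====
theorem group_spans_py_spec : Claim_equal_group_spans_py := by
  intro rows _ hpre
  unfold Spec_group_spans_py
  match rows, hpre with
  | r :: rest, _ => rw [a_eq_runs, b_eq_runs]
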